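-- pv_equiv track=rewrite | github.com/iamvaibhavrai/CodeChef | Contest/Snackdown 2016/Pre Elimination Round A/Art/art.py | finishPainting
-- ===== SOURCE A (Python) =====
-- def finishPainting(p,n):
--     if n < 3:
--         return False
--     prev = p[0]
--     flag1 = 1
--     flag2 = 1
--     for i in range(n):
--         curr = p[i]
--         if curr != prev:
--             if n-i < 3:
--                 flag1 = 0
--         prev = p[i] if curr != prev else prev
--     for i in range(n-1,-1,-1):
--         curr = p[i]
--         if curr != prev:
--             if i-2 < 0:
--                 flag2 = 0
--         prev = p[i] if curr != prev else prev
--     if flag1 or flag2: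
--         return True
--     return False
-- ===== SOURCE B (Python) =====
-- def finishPainting(p, n):
--     if n < 3:
--         return False
--     return p[0] == p[1] == p[2] or p[n-3] == p[n-2] == p[n-1]
-- ===== Notes on version B (the rewrite author's own statement) =====
-- stated objective: faster
-- what changed: A's two O(n) flag-tracking scans only ever depend on the boundaries, so B replaces them with a closed-form O(1) check that the first three or the last three of the n inspected elements are equal (same n<3 guard).
import Mathlib
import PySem

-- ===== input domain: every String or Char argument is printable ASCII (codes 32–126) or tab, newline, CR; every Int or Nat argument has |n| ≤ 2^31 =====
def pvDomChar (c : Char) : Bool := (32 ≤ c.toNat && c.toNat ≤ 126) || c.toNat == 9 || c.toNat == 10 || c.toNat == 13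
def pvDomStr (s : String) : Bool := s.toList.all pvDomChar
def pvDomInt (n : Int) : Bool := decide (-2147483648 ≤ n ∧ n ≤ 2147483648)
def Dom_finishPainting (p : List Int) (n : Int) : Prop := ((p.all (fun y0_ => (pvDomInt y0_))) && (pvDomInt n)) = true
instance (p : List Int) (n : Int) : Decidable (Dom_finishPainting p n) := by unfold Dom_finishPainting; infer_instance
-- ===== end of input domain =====

-- B replaces A's two O(n) flag-tracking scans by the closed-form O(1) boundary check
-- (first three or last three of the n inspected elements equal) that they amount to.

-- ===== PORT A =====
-- Indexing p[i] is ported as pyGetD with default 0; Pre_ guarantees every index read is in range.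
def finishPainting (p : List Int) (n : Int) : Bool :=
  if n < 3 then false
  else
    let prev := PySem.List.pyGetD p 0 0
    let st1 := (PySem.List.pyRange 0 n 1).foldl (fun (st : Int × Int) i =>
      let curr := PySem.List.pyGetD p i 0
      let flag1 := if curr ≠ st.1 ∧ n - i < 3 then (0:Int) else st.2
      let prev' := if curr ≠ st.1 then PySem.List.pyGetD p i 0 else st.1
      (prev', flag1)) (prev, 1)
    let st2 := (PySem.List.pyRange (n-1) (-1) (-1)).foldl (fun (st : Int × Int) i =>
      let curr := PySem.List.pyGetD p i 0
      let flag2 := if curr ≠ st.1 ∧ i - 2 < 0 then (0:Int) else st.2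
      let prev' := if curr ≠ st.1 then PySem.List.pyGetD p i 0 else st.1
      (prev', flag2)) (st1.1, 1)
    if st1.2 ≠ 0 ∨ st2.2 ≠ 0 then true else false

-- ===== PORT B =====
def finishPainting_alt (p : List Int) (n : Int) : Bool :=
  if n < 3 then false
  else
    (decide (PySem.List.pyGetD p 0 0 = PySem.List.pyGetD p 1 0) &&
     decide (PySem.List.pyGetD p 1 0 = PySem.List.pyGetD p 2 0)) ||
    (decide (PySem.List.pyGetD p (n-3) 0 = PySem.List.pyGetD p (n-2) 0) &&
     decide (PySem.List.pyGetD p (n-2) 0 = PySem.List.pyGetD p (n-1) 0))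

-- ===== PRECONDITION & SPEC =====
-- Pre_ excludes exactly the inputs where Python A raises IndexError: n ≥ 3 together with n > len(p).
def Pre_finishPainting (p : List Int) (n : Int) : Prop := n < 3 ∨ n ≤ (p.length : Int)
instance (p : List Int) (n : Int) : Decidable (Pre_finishPainting p n) := by
  unfold Pre_finishPainting; infer_instance
def pvWitness_finishPainting : List Int × Int := ([1, 1, 2, 3], 4)

def Spec_finishPainting (p : List Int) (n : Int) (out : Bool) : Prop := out = finishPainting_alt p n
instance (p : List Int) (n : Int) (out : Bool) : Decidable (Spec_finishPainting p n out) := by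
  unfold Spec_finishPainting; infer_instance

-- ===== CLAIM (what is proved, stated in full; the proofs are below) =====
def Claim_equal_finishPainting : Prop := ∀ (p : List Int) (n : Int), Dom_finishPainting p n → Pre_finishPainting p n → Spec_finishPainting p n (finishPainting p n)

-- ===== LEMMAS AND PROOFS =====

-- The forward loop over range(0, m) with m ≤ n-2 keeps flag1 = 1 and leaves prev = p[m-1].
theorem fwd_loop (p : List Int) (n : Int) :
    ∀ m : Int, 1 ≤ m → m ≤ n - 2 →
    (PySem.List.pyRange 0 m 1).foldl (fun (st : Int × Int) i =>
      let curr := PySem.List.pyGetD p i 0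
      let flag1 := if curr ≠ st.1 ∧ n - i < 3 then (0:Int) else st.2
      let prev' := if curr ≠ st.1 then PySem.List.pyGetD p i 0 else st.1
      (prev', flag1)) (PySem.List.pyGetD p 0 0, 1)
    = (PySem.List.pyGetD p (m-1) 0, 1) := by
  refine Int.le_induction
    (motive := fun m _ => m ≤ n - 2 →
      (PySem.List.pyRange 0 m 1).foldl (fun (st : Int × Int) i =>
      let curr := PySem.List.pyGetD p i 0
      let flag1 := if curr ≠ st.1 ∧ n - i < 3 then (0:Int) else st.2
      let prev' := if curr ≠ st.1 then PySem.List.pyGetD p i 0 else st.1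
      (prev', flag1)) (PySem.List.pyGetD p 0 0, 1)
      = (PySem.List.pyGetD p (m-1) 0, 1)) ?_ ?_
  · intro _
    rw [show PySem.List.pyRange 0 1 1 = [0] from by
      rw [PySem.List.pyRange_one_cons (by norm_num), PySem.List.pyRange_one_eq_nil (by norm_num)]]
    simp
  · intro m hm ih hm2
    rw [PySem.List.pyRange_one_succ_right (by omega), List.foldl_append, ih (by omega)]
    simp only [List.foldl_cons, List.foldl_nil]
    have hflag : ¬ (n - m < 3) := by omega
    by_cases h : PySem.List.pyGetD p m 0 = PySem.List.pyGetD p (m-1) 0 <;>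
      simp [h, hflag, show m + 1 - 1 = m by ring]

-- The two final forward steps (i = n-2 and i = n-1) decide flag1: last three elements equal.
theorem fwd_tail (p : List Int) (n : Int) :
    List.foldl (fun (st : Int × Int) i =>
      let curr := PySem.List.pyGetD p i 0
      let flag1 := if curr ≠ st.1 ∧ n - i < 3 then (0:Int) else st.2
      let prev' := if curr ≠ st.1 then PySem.List.pyGetD p i 0 else st.1
      (prev', flag1)) (PySem.List.pyGetD p (n-2-1) 0, 1) [n-2, n-1]
    = (PySem.List.pyGetD p (n-1) 0,
       if PySem.List.pyGetD p (n-2-1) 0 = PySem.List.pyGetD p (n-2) 0 ∧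
          PySem.List.pyGetD p (n-2) 0 = PySem.List.pyGetD p (n-1) 0 then 1 else 0) := by
  simp only [List.foldl_cons, List.foldl_nil]
  by_cases e1 : PySem.List.pyGetD p (n-2) 0 = PySem.List.pyGetD p (n-2-1) 0 <;>
  by_cases e2 : PySem.List.pyGetD p (n-1) 0 = PySem.List.pyGetD p (n-2) 0 <;>
    simp [e1, e2, eq_comm]

-- Splitting a countdown range on the right.
theorem pyRange_neg_one_snoc (a b : Int) (h : b + 1 ≤ a) :
    PySem.List.pyRange a b (-1) = PySem.List.pyRange a (b+1) (-1) ++ [b+1] := by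
  rw [PySem.List.pyRange_neg_one_eq_reverse, PySem.List.pyRange_neg_one_eq_reverse,
      PySem.List.pyRange_one_cons (by omega)]
  simp

-- The backward loop over range(n-1, m-2, -1) with 2 ≤ m keeps flag2 = 1 and leaves prev = p[m].
theorem bwd_loop (p : List Int) (n : Int) :
    ∀ m : Int, m ≤ n - 1 → 2 ≤ m →
    (PySem.List.pyRange (n-1) (m-1) (-1)).foldl (fun (st : Int × Int) i =>
      let curr := PySem.List.pyGetD p i 0
      let flag2 := if curr ≠ st.1 ∧ i - 2 < 0 then (0:Int) else st.2
      let prev' := if curr ≠ st.1 then PySem.List.pyGetD p i 0 else st.1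
      (prev', flag2)) (PySem.List.pyGetD p (n-1) 0, 1)
    = (PySem.List.pyGetD p m 0, 1) := by
  refine Int.le_induction_down
    (motive := fun m _ => 2 ≤ m →
      (PySem.List.pyRange (n-1) (m-1) (-1)).foldl (fun (st : Int × Int) i =>
      let curr := PySem.List.pyGetD p i 0
      let flag2 := if curr ≠ st.1 ∧ i - 2 < 0 then (0:Int) else st.2
      let prev' := if curr ≠ st.1 then PySem.List.pyGetD p i 0 else st.1
      (prev', flag2)) (PySem.List.pyGetD p (n-1) 0, 1)
      = (PySem.List.pyGetD p m 0, 1)) ?_ ?_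
  · intro _
    rw [PySem.List.pyRange_neg_one_cons (by omega),
        PySem.List.pyRange_neg_one_eq_nil (by omega)]
    simp
  · intro m hm ih hm2
    rw [show m - 1 - 1 = (m - 2) by ring, pyRange_neg_one_snoc _ _ (by omega),
        List.foldl_append, show m - 2 + 1 = m - 1 by ring, ih (by omega)]
    simp only [List.foldl_cons, List.foldl_nil]
    have hflag : ¬ (m - 1 - 2 < 0) := by omega
    by_cases h : PySem.List.pyGetD p (m-1) 0 = PySem.List.pyGetD p m 0 <;>
      simp [h, hflag]

-- The whole backward loop, from any initial prev equal to p[n-1]: flag2 decides first three equal.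
theorem bwd_full (p : List Int) (n : Int) (q : Int) (h3 : 3 ≤ n)
    (hq : q = PySem.List.pyGetD p (n-1) 0) :
    (PySem.List.pyRange (n-1) (-1) (-1)).foldl (fun (st : Int × Int) i =>
      let curr := PySem.List.pyGetD p i 0
      let flag2 := if curr ≠ st.1 ∧ i - 2 < 0 then (0:Int) else st.2
      let prev' := if curr ≠ st.1 then PySem.List.pyGetD p i 0 else st.1
      (prev', flag2)) (q, 1)
    = (PySem.List.pyGetD p 0 0,
       if PySem.List.pyGetD p 0 0 = PySem.List.pyGetD p 1 0 ∧
          PySem.List.pyGetD p 1 0 = PySem.List.pyGetD p 2 0 then 1 else 0) := by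
  subst hq
  have hsplitB : PySem.List.pyRange (n-1) (-1) (-1)
      = PySem.List.pyRange (n-1) (2-1) (-1) ++ [1, 0] := by
    rw [pyRange_neg_one_snoc (n-1) (-1) (by omega)]
    norm_num
    rw [pyRange_neg_one_snoc (n-1) 0 (by omega)]
    norm_num
  rw [hsplitB, List.foldl_append, bwd_loop p n 2 (by omega) (by omega)]
  simp only [List.foldl_cons, List.foldl_nil]
  by_cases e1 : PySem.List.pyGetD p 1 0 = PySem.List.pyGetD p 2 0 <;>
  by_cases e2 : PySem.List.pyGetD p 0 0 = PySem.List.pyGetD p 1 0 <;>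
    simp [e1, e2, eq_comm]

-- ===== VERDICT (by name: the statement is the Claim_ definition above) =====
theorem finishPainting_spec : Claim_equal_finishPainting := by
  intro p n _ _
  unfold Spec_finishPainting finishPainting finishPainting_alt
  by_cases hn : n < 3
  · simp [hn]
  · have h3 : 3 ≤ n := by omega
    have hsplitF : PySem.List.pyRange 0 n 1
        = PySem.List.pyRange 0 (n-2) 1 ++ [n-2, n-1] := by
      rw [PySem.List.pyRange_one_append 0 (n-2) n (by omega) (by omega),
          PySem.List.pyRange_one_cons (show n-2 < n by omega),
          PySem.List.pyRange_one_cons (show n-2+1 < n by omega),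
          PySem.List.pyRange_one_eq_nil (show n ≤ n-2+1+1 by omega)]
      norm_num [show n - 2 + 1 = n - 1 by ring]
    simp only [hn, if_false]
    rw [hsplitF, List.foldl_append, fwd_loop p n (n-2) (by omega) (by omega),
        fwd_tail p n, bwd_full p n _ h3 rfl]
    by_cases e1 : PySem.List.pyGetD p 0 0 = PySem.List.pyGetD p 1 0 <;>
    by_cases e2 : PySem.List.pyGetD p 1 0 = PySem.List.pyGetD p 2 0 <;>
    by_cases e3 : PySem.List.pyGetD p (n-2-1) 0 = PySem.List.pyGetD p (n-2) 0 <;>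
    by_cases e4 : PySem.List.pyGetD p (n-2) 0 = PySem.List.pyGetD p (n-1) 0 <;>
      simp [e1, e2, e3, e4, Bool.or_comm, show n - 3 = n - 2 - 1 by ring]
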